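-- pv_equiv track=rewrite | github.com/avisajn/bacas | flashgo_web/common/utils.py | filter_by_user_impression
-- ===== SOURCE A (Python) =====
-- from typing import List
--
-- def filter_by_user_impression(feed_ids: List[int], filter_ids: List[int], with_impression: bool = True):
--     impression_ids = set(filter_ids)
--     unread = []
--     read = []
--     for item_id in feed_ids:
--         if item_id in impression_ids:
--             read.append(item_id)
--         else:
--             unread.append(item_id)
--     if with_impression:
--         return unread + read
--     else:
--         return unread
-- ===== SOURCE B (Python) =====
-- def filter_by_user_impression(feed_ids, filter_ids, with_impression=True):
--     impression_ids = set(filter_ids)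
--     if with_impression:
--         # stable sort: non-members (key False) first in order, then members in order
--         return sorted(feed_ids, key=lambda x: x in impression_ids)
--     return [x for x in feed_ids if x not in impression_ids]
-- ===== Notes on version B (the rewrite author's own statement) =====
-- stated objective: idiomatic
-- what changed: Replaces the explicit two-bucket partition loop with a stable sort keyed by set membership (non-members first) for the with_impression case, and a single filtering comprehension otherwise.
import Mathlib
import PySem

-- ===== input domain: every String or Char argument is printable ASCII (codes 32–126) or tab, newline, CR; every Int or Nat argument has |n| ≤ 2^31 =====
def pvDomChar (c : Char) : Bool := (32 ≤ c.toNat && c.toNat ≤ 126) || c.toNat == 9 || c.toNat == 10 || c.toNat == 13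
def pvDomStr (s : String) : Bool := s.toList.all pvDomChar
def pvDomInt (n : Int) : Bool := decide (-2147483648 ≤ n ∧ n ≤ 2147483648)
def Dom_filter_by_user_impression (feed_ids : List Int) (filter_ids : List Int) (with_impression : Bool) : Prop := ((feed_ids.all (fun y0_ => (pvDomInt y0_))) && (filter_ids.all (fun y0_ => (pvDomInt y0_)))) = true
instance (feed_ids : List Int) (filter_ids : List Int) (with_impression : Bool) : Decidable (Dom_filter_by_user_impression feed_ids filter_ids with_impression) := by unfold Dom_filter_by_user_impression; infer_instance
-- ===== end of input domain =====

-- B replaces A's explicit two-bucket partition loop by a stable sort keyed by set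
-- membership (with_impression) / a single filter (otherwise); same cost class, more idiomatic.


-- ===== PORT A =====
def filter_by_user_impression (feed_ids : List Int) (filter_ids : List Int) (with_impression : Bool) : List Int :=
  let impression_ids : PySem.Set Int := PySem.Set.ofList filter_ids
  let p : List Int × List Int :=
    feed_ids.foldl (fun acc item_id =>
      if PySem.Set.contains impression_ids item_id then (acc.1, acc.2 ++ [item_id])
      else (acc.1 ++ [item_id], acc.2)) ([], [])
  if with_impression then p.1 ++ p.2 else p.1

-- ===== PORT B =====
def filter_by_user_impression_alt (feed_ids : List Int) (filter_ids : List Int) (with_impression : Bool) : List Int :=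
  let impression_ids : PySem.Set Int := PySem.Set.ofList filter_ids
  if with_impression then
    PySem.List.sorted feed_ids (fun x => PySem.Set.contains impression_ids x) false
  else
    feed_ids.filter (fun x => !(PySem.Set.contains impression_ids x))

-- ===== PRECONDITION & SPEC =====
def Spec_filter_by_user_impression (feed_ids : List Int) (filter_ids : List Int) (with_impression : Bool) (out : List Int) : Prop := out = filter_by_user_impression_alt feed_ids filter_ids with_impression
instance (feed_ids : List Int) (filter_ids : List Int) (with_impression : Bool) (out : List Int) : Decidable (Spec_filter_by_user_impression feed_ids filter_ids with_impression out) := by unfold Spec_filter_by_user_impression; infer_instance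

-- ===== CLAIM (what is proved, stated in full; the proofs are below) =====
def Claim_equal_filter_by_user_impression : Prop := ∀ (feed_ids : List Int) (filter_ids : List Int) (with_impression : Bool), Dom_filter_by_user_impression feed_ids filter_ids with_impression → Spec_filter_by_user_impression feed_ids filter_ids with_impression (filter_by_user_impression feed_ids filter_ids with_impression)

-- ===== LEMMAS AND PROOFS =====

-- inserting a key-false element into (all-false ++ all-true) puts it between the blocks
theorem insertBy_false_block {α : Type} (k : α → Bool) (x : α) (F T : List α)
    (hF : ∀ y ∈ F, k y = false) (hT : ∀ y ∈ T, k y = true) (hx : k x = false) :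
    PySem.List.insertBy (fun a b => decide (k a < k b)) x (F ++ T) = F ++ x :: T := by
  induction F with
  | nil =>
    cases T with
    | nil => simp [PySem.List.insertBy]
    | cons y ys =>
      have hy := hT y (by simp)
      simp [PySem.List.insertBy, hx, hy]
  | cons f F' ih =>
    have hf := hF f (by simp)
    simp only [List.cons_append, PySem.List.insertBy, hx, hf]
    simp [ih (fun y hy => hF y (by simp [hy]))]

-- the stable sort keyed by a Bool predicate is exactly "falses then trues", each in order
theorem sorted_bool_key {α : Type} (k : α → Bool) (xs : List α) :
    PySem.List.sorted xs k false = xs.filter (fun x => !k x) ++ xs.filter k := by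
  suffices h : ∀ (F T : List α), (∀ y ∈ F, k y = false) → (∀ y ∈ T, k y = true) →
      xs.foldl (fun acc x => PySem.List.insertBy (fun a b => decide (k a < k b)) x acc) (F ++ T)
        = (F ++ xs.filter (fun x => !k x)) ++ (T ++ xs.filter k) by
    have := h [] [] (by simp) (by simp)
    simpa [PySem.List.sorted] using this
  induction xs with
  | nil => intro F T _ _; simp
  | cons x xs ih =>
    intro F T hF hT
    by_cases hx : k x = true
    · have hb : ∀ y ∈ F ++ T, (fun a b => decide (k a < k b)) x y = false := by
        intro y _; simp [hx, Bool.lt_iff]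
      rw [List.foldl_cons,
        PySem.List.insertBy_of_forall_not_before (fun a b => decide (k a < k b)) x (F ++ T) hb,
        List.append_assoc]
      have := ih F (T ++ [x]) hF (by
        intro y hy
        rcases List.mem_append.mp hy with h | h
        · exact hT y h
        · simp at h; simp [h, hx])
      rw [this]
      simp [hx]
    · have hx' : k x = false := by simpa using hx
      rw [List.foldl_cons, insertBy_false_block k x F T hF hT hx']
      have heq : F ++ x :: T = (F ++ [x]) ++ T := by simp
      rw [heq, ih (F ++ [x]) T (by
        intro y hy
        rcases List.mem_append.mp hy with h | h
        · exact hF y h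
        · simp at h; simp [h, hx']) hT]
      simp [hx']

-- A's two-bucket partition loop computes the two filters
theorem partition_foldl (c : Int → Bool) (xs : List Int) (u r : List Int) :
    xs.foldl (fun acc item_id =>
        if c item_id then (acc.1, acc.2 ++ [item_id]) else (acc.1 ++ [item_id], acc.2)) (u, r)
      = (u ++ xs.filter (fun x => !c x), r ++ xs.filter c) := by
  induction xs generalizing u r with
  | nil => simp
  | cons x xs ih =>
    by_cases hx : c x = true
    · simp [List.foldl_cons, hx, ih]
    · have hx' : c x = false := by simpa using hx
      simp [List.foldl_cons, hx', ih]

-- ===== VERDICT (by name: the statement is the Claim_ definition above) =====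
theorem filter_by_user_impression_spec : Claim_equal_filter_by_user_impression := by
  intro feed_ids filter_ids with_impression _
  unfold Spec_filter_by_user_impression filter_by_user_impression filter_by_user_impression_alt
  simp only [partition_foldl, sorted_bool_key]
  cases with_impression <;> simp
  apply List.filter_congr
  intro x _
  simp [PySem.Set.contains, PySem.Set.mem_ofList]
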